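-- pv_equiv track=rewrite | github.com/Dagonite/countdown-tools | scripts/simulate_rounds.py | find_best_words
-- ===== SOURCE A (Python) =====
-- from itertools import combinations
-- from typing import Iterable, List, Sequence, Tuple
--
-- AnagramIndex = dict[int, dict[str, List[str]]]
--
-- WordOrder = dict[str, int]
--
-- def find_best_words(selection: Sequence[str], anagram_index: AnagramIndex, word_order: WordOrder) -> Tuple[List[str], int]:
--     """Return the longest constructible word(s) and their length for the
--     selection."""
--
--     if not anagram_index:
--         return [], 0
--
--     letters = sorted(selection)
--     max_length = min(len(letters), max(anagram_index))
--
--     for target_length in range(max_length, 0, -1):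
--         buckets = anagram_index.get(target_length)
--         if not buckets:
--             continue
--
--         seen_keys: set[str] = set()
--         matches: List[str] = []
--
--         for combo in combinations(range(len(letters)), target_length):
--             key = "".join(letters[i] for i in combo)
--
--             # Skip duplicate keys produced by repeated letters to avoid redundant lookups
--             if key in seen_keys:
--                 continue
--
--             seen_keys.add(key)
--             words = buckets.get(key)
--
--             if words:
--                 matches.extend(words)
--
--         if matches:
--             matches.sort(key=word_order.get)
--             return matches, target_length
--
--     return [], 0
-- ===== SOURCE B (Python) =====
-- def _covers(pool, key):
--     """Cheap necessary condition: key's character counts fit in the selection's pool."""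
--     need = {}
--     for ch in key:
--         need[ch] = need.get(ch, 0) + 1
--     return all(n <= pool.get(ch, 0) for ch, n in need.items())
--
--
-- def _can_form(letters, key, count):
--     """DP subsequence test: can `key` be written as the concatenation of
--     exactly `count` elements of `letters` taken at increasing indices?"""
--     states = {(0, 0)}
--     for letter in letters:
--         m = len(letter)
--         new_states = set(states)
--         for pos, used in states:
--             if key.startswith(letter, pos):
--                 new_states.add((pos + m, used + 1))
--         states = new_states
--     return (len(key), count) in states
--
--
-- def find_best_words(selection, anagram_index, word_order):
--     """Return the longest constructible word(s) and their length for the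
--     selection, by testing each bucket key directly instead of enumerating
--     all combinations of the selection."""
--
--     if not anagram_index:
--         return [], 0
--
--     letters = sorted(selection)
--     pool = {}
--     for ch in ''.join(letters):
--         pool[ch] = pool.get(ch, 0) + 1
--     max_length = min(len(letters), max(anagram_index))
--
--     for target_length in range(max_length, 0, -1):
--         buckets = anagram_index.get(target_length)
--         if not buckets:
--             continue
--
--         matches = []
--         for key, words in buckets.items():
--             if words and _covers(pool, key) and _can_form(letters, key, target_length):
--                 matches.extend(words)
--
--         if matches:
--             matches.sort(key=word_order.get)
--             return matches, target_length
--
--     return [], 0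
-- ===== Notes on version B (the rewrite author's own statement) =====
-- stated objective: faster
-- what changed: Instead of enumerating all C(n,k) index combinations of the sorted selection and looking each concatenated key up in the bucket, B scans the bucket's keys once, rejects keys whose character counts exceed the selection's character pool, and tests the remaining keys with a subsequence-concatenation DP over the selection.
-- outside the precondition, e.g. on find_best_words(['a'], {1: {'a': ['x']}}, {}): A returns (['x'], 1), B returns (['x'], 1)
import Mathlib
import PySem

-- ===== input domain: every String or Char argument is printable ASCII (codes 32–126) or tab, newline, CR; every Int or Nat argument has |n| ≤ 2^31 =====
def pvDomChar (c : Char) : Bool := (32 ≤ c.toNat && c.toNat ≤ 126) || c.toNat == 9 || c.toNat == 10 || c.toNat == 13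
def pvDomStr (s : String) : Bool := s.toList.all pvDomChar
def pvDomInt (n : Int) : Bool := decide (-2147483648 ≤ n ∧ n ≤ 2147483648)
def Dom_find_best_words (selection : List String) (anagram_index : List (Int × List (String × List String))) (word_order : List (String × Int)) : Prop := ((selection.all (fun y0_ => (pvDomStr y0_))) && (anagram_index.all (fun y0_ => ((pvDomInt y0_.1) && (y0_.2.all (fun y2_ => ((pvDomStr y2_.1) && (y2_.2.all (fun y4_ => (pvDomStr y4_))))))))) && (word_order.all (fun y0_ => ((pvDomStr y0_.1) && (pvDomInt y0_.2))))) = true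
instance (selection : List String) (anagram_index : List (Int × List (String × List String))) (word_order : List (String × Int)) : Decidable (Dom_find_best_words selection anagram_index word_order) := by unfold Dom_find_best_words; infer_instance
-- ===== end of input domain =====

-- B replaces A's enumeration of all index combinations of the selection by a single scan of the
-- bucket's keys, testing each key with a subsequence-concatenation DP over the selection (faster
-- in a timing run's measurement; equivalence proved on Pre_ below).

-- ===== PORT A =====
-- itertools.combinations(xs, r): the r-element subsequences of xs, in itertools' lexicographic order
def pvCombos : List Nat → Nat → List (List Nat)
  | _, 0 => [[]]
  | [], _ + 1 => []
  | x :: xs, k + 1 => (pvCombos xs k).map (x :: ·) ++ pvCombos xs (k + 1)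

-- key = "".join(letters[i] for i in combo); combination indices are always in range, so getD is exact
def pvKeyOf (letters : List String) (combo : List Nat) : String :=
  PySem.Str.join "" (combo.map (fun i => letters.getD i ""))

-- the body of A's combination loop: state = (seen_keys, matches)
def pvAStep (buckets : List (String × List String)) (st : PySem.Set String × List String) (key : String) : PySem.Set String × List String :=
  if PySem.Set.contains st.1 key then st
  else
    match (PySem.Dict.mk buckets).get? key with
    | some ws => if ws = [] then (PySem.Set.add st.1 key, st.2) else (PySem.Set.add st.1 key, st.2 ++ ws)
    | none => (PySem.Set.add st.1 key, st.2)

-- sorted(selection) is ported with key s.toList: the identical code-point order, kernel-reducible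
-- one iteration of A's 'for target_length in range(max_length, 0, -1)' loop; some = early return
-- (sort key word_order.get ported as getD _ 0: exact, since Pre_ puts every matched word in word_order)
def pvATry (letters : List String) (anagram_index : List (Int × List (String × List String))) (word_order : List (String × Int)) (tl : Int) : Option (List String × Int) :=
  match (PySem.Dict.mk anagram_index).get? tl with
  | none => none
  | some buckets =>
    if buckets = [] then none
    else
      let ms := ((pvCombos (List.range letters.length) tl.toNat).foldl
        (fun st combo => pvAStep buckets st (pvKeyOf letters combo)) (PySem.Set.empty, [])).2
      if ms = [] then none
      else some (PySem.List.sorted ms (fun w => (PySem.Dict.mk word_order).getD w 0), tl)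

def find_best_words (selection : List String) (anagram_index : List (Int × List (String × List String))) (word_order : List (String × Int)) : List String × Int :=
  if anagram_index = [] then ([], 0)
  else
    let letters := PySem.List.sorted selection (fun s => s.toList)
    let maxLength : Int := min (letters.length : Int) ((PySem.List.max? (anagram_index.map Prod.fst) (fun x => x)).getD 0)
    ((PySem.List.pyRange maxLength 0 (-1)).findSome? (pvATry letters anagram_index word_order)).getD ([], 0)

-- ===== PORT B =====
-- _covers: the key's character counts fit in the selection's character pool (pool = that counting loop)
def pvCovers (pool : PySem.Dict Char Int) (key : String) : Bool :=
  (key.toList.foldl (fun d ch => d.modify ch 0 (· + 1)) PySem.Dict.empty).items.all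
    (fun kv => kv.2 ≤ pool.getD kv.1 0)

-- _can_form: DP over the selection; states = set of (chars of key consumed, letters used)
def pvCanForm (letters : List String) (key : String) (count : Nat) : Bool :=
  PySem.Set.contains
    (letters.foldl
      (fun (states : PySem.Set (Nat × Nat)) letter =>
        states.foldl
          (fun ns pu =>
            if letter.toList.isPrefixOf (key.toList.drop pu.1)
            then PySem.Set.add ns (pu.1 + letter.toList.length, pu.2 + 1)
            else ns)
          states)
      (PySem.Set.ofList [((0 : Nat), (0 : Nat))]))
    (key.toList.length, count)

-- one iteration of B's outer loop: scan the bucket's items once, keep words of constructible keys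
def pvBTry (letters : List String) (pool : PySem.Dict Char Int) (anagram_index : List (Int × List (String × List String))) (word_order : List (String × Int)) (tl : Int) : Option (List String × Int) :=
  match (PySem.Dict.mk anagram_index).get? tl with
  | none => none
  | some buckets =>
    if buckets = [] then none
    else
      let ms := buckets.foldl
        (fun acc kv => if kv.2 ≠ [] ∧ pvCovers pool kv.1 ∧ pvCanForm letters kv.1 tl.toNat then acc ++ kv.2 else acc) []
      if ms = [] then none
      else some (PySem.List.sorted ms (fun w => (PySem.Dict.mk word_order).getD w 0), tl)

def find_best_words_alt (selection : List String) (anagram_index : List (Int × List (String × List String))) (word_order : List (String × Int)) : List String × Int :=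
  if anagram_index = [] then ([], 0)
  else
    let letters := PySem.List.sorted selection (fun s => s.toList)
    let pool := (PySem.Str.join "" letters).toList.foldl (fun d ch => d.modify ch 0 (· + 1)) PySem.Dict.empty
    let maxLength : Int := min (letters.length : Int) ((PySem.List.max? (anagram_index.map Prod.fst) (fun x => x)).getD 0)
    ((PySem.List.pyRange maxLength 0 (-1)).findSome? (pvBTry letters pool anagram_index word_order)).getD ([], 0)

-- ===== PRECONDITION & SPEC =====
def pvConcat (s : List String) : List Char := (s.map String.toList).flatten

-- key can be built by concatenating exactly L letters of the sorted selection at increasing positions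
def pvFormable (selection : List String) (key : String) (L : Int) : Bool :=
  decide (1 ≤ L) &&
    (PySem.List.sorted selection (fun x => x.toList)).sublists.any
      (fun s => decide (s.length = L.toNat) && decide (pvConcat s = key.toList))

-- the words A can actually match at the entry e = (length, bucket): words of constructible keys
def pvMatchWords (selection : List String) (e : Int × List (String × List String)) : List String :=
  (e.2.filter (fun kv => pvFormable selection kv.1 e.1)).flatMap Prod.snd

-- Pre_ excludes: association lists with a repeated dict key (an artefact of the list encoding — a Python
-- dict never has them), inputs where a matchable word (a word of a constructible key) is missing from
-- word_order (A's sort key is None there: a TypeError as soon as two matches are compared), and tied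
-- orderings among matchable words (equal word_order ranks, or the same word indexed twice at one length),
-- on which the order of A's returned list is an accident of its combination-enumeration order.
def Pre_find_best_words (selection : List String) (anagram_index : List (Int × List (String × List String))) (word_order : List (String × Int)) : Prop :=
  (anagram_index.map Prod.fst).Nodup ∧
  (word_order.map Prod.fst).Nodup ∧
  ∀ e ∈ anagram_index,
    (e.2.map Prod.fst).Nodup ∧
    (pvMatchWords selection e).Nodup ∧
    (∀ w ∈ pvMatchWords selection e, w ∈ word_order.map Prod.fst) ∧
    (∀ p ∈ word_order, ∀ q ∈ word_order, p.1 ∈ pvMatchWords selection e →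
      q.1 ∈ pvMatchWords selection e → p.1 ≠ q.1 → p.2 ≠ q.2)

instance (selection : List String) (anagram_index : List (Int × List (String × List String))) (word_order : List (String × Int)) : Decidable (Pre_find_best_words selection anagram_index word_order) := by unfold Pre_find_best_words; infer_instance

def pvWitness_find_best_words : List String × (List (Int × List (String × List String))) × (List (String × Int)) :=
  (["a", "b"], [(1, [("a", ["ax"]), ("b", ["bx"])]), (2, [("ab", ["ba"])])], [("ba", 0), ("ax", 1), ("bx", 2)])

def Spec_find_best_words (selection : List String) (anagram_index : List (Int × List (String × List String))) (word_order : List (String × Int)) (out : List String × Int) : Prop := out = find_best_words_alt selection anagram_index word_order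
instance (selection : List String) (anagram_index : List (Int × List (String × List String))) (word_order : List (String × Int)) (out : List String × Int) : Decidable (Spec_find_best_words selection anagram_index word_order out) := by unfold Spec_find_best_words; infer_instance

-- ===== CLAIM (what is proved, stated in full; the proofs are below) =====
def Claim_equal_find_best_words : Prop := ∀ (selection : List String) (anagram_index : List (Int × List (String × List String))) (word_order : List (String × Int)), Dom_find_best_words selection anagram_index word_order → Pre_find_best_words selection anagram_index word_order → Spec_find_best_words selection anagram_index word_order (find_best_words selection anagram_index word_order)

-- ===== LEMMAS AND PROOFS =====

-- the words a key contributes (first matching bucket entry, [] if absent or empty)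
def pvG (buckets : List (String × List String)) (k : String) : List String :=
  ((PySem.Dict.mk buckets).get? k).getD []

-- the keys A actually looks up: first occurrences not yet in seen
def pvNewKeys : List String → PySem.Set String → List String
  | [], _ => []
  | k :: ks, seen =>
    if k ∈ seen then pvNewKeys ks seen else k :: pvNewKeys ks (PySem.Set.add seen k)

-- the DP invariant: (p, c) is a state iff some c-element subsequence of letters concatenates to key's first p chars
def pvReach (letters : List String) (kl : List Char) (x : Nat × Nat) : Prop :=
  ∃ s, s.Sublist letters ∧ s.length = x.2 ∧ pvConcat s = kl.take x.1 ∧ x.1 ≤ kl.length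

lemma pvJoinEmpty (ls : List (List Char)) : PySem.Chars.join [] ls = ls.flatten := by
  induction ls with
  | nil => simp [PySem.Chars.join_nil]
  | cons x xs ih =>
    cases xs with
    | nil => simp [PySem.Chars.join_singleton]
    | cons y ys => simp only [PySem.Chars.join_cons_cons, List.flatten_cons] at *; simp [ih]

lemma toList_pvKeyOf (letters : List String) (c : List Nat) :
    (pvKeyOf letters c).toList = pvConcat (c.map (fun i => letters.getD i "")) := by
  simp [pvKeyOf, PySem.Str.toList_join, pvJoinEmpty, pvConcat, List.map_map]

lemma pvAFold_eq (buckets : List (String × List String)) :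
    ∀ (ks : List String) (seen : PySem.Set String) (acc : List String),
      (ks.foldl (pvAStep buckets) (seen, acc)).2 = acc ++ (pvNewKeys ks seen).flatMap (pvG buckets) := by
  intro ks
  induction ks with
  | nil => intro seen acc; simp [pvNewKeys]
  | cons k ks ih =>
    intro seen acc
    simp only [List.foldl_cons, pvNewKeys]
    by_cases hk : k ∈ seen
    · rw [if_pos hk]
      have hc : PySem.Set.contains seen k = true := (PySem.Set.contains_iff seen k).mpr hk
      simp only [pvAStep, hc, if_pos]
      exact ih seen acc
    · have hc : ¬ PySem.Set.contains seen k = true := fun h => hk ((PySem.Set.contains_iff seen k).mp h)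
      rw [if_neg hk]
      simp only [pvAStep, hc, if_neg, Bool.false_eq_true, not_false_iff]
      cases hg : (PySem.Dict.mk buckets).get? k with
      | none =>
        simp only []
        rw [ih]
        simp [pvG, hg]
      | some ws =>
        by_cases hw : ws = []
        · subst hw; simp only [reduceIte]
          rw [ih]
          simp [pvG, hg]
        · simp only [if_neg hw]
          rw [ih]
          simp [pvG, hg]


lemma mem_pvNewKeys : ∀ (ks : List String) (seen : PySem.Set String) (x : String),
    x ∈ pvNewKeys ks seen ↔ x ∈ ks ∧ x ∉ seen := by
  intro ks
  induction ks with
  | nil => intro seen x; simp [pvNewKeys]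
  | cons k ks ih =>
    intro seen x
    simp only [pvNewKeys]
    by_cases hk : k ∈ seen
    · rw [if_pos hk, ih]
      constructor
      · rintro ⟨h1, h2⟩; exact ⟨List.mem_cons_of_mem _ h1, h2⟩
      · rintro ⟨h1, h2⟩
        rcases List.mem_cons.mp h1 with rfl | h1
        · exact absurd hk h2
        · exact ⟨h1, h2⟩
    · rw [if_neg hk]
      simp only [List.mem_cons, ih, PySem.Set.mem_add]
      constructor
      · rintro (rfl | ⟨h1, h2⟩)
        · exact ⟨Or.inl rfl, hk⟩
        · exact ⟨Or.inr h1, fun hx => h2 (Or.inl hx)⟩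
      · rintro ⟨rfl | h1, h2⟩
        · exact Or.inl rfl
        · by_cases hxk : x = k
          · exact Or.inl hxk
          · exact Or.inr ⟨h1, by rintro (h | h); exact h2 h; exact hxk h⟩


lemma nodup_pvNewKeys : ∀ (ks : List String) (seen : PySem.Set String), (pvNewKeys ks seen).Nodup := by
  intro ks
  induction ks with
  | nil => intro seen; simp [pvNewKeys]
  | cons k ks ih =>
    intro seen
    simp only [pvNewKeys]
    by_cases hk : k ∈ seen
    · rw [if_pos hk]; exact ih seen
    · rw [if_neg hk]
      refine List.nodup_cons.mpr ⟨fun hmem => ?_, ih _⟩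
      have := (mem_pvNewKeys ks (PySem.Set.add seen k) k).mp hmem
      exact this.2 ((PySem.Set.mem_add seen k k).mpr (Or.inr rfl))


lemma pvBFold_eq (letters : List String) (pool : PySem.Dict Char Int) (k : Nat) :
    ∀ (l : List (String × List String)) (acc : List String),
      l.foldl (fun acc kv => if kv.2 ≠ [] ∧ pvCovers pool kv.1 ∧ pvCanForm letters kv.1 k then acc ++ kv.2 else acc) acc
        = acc ++ (l.filter (fun kv => !kv.2.isEmpty && (pvCovers pool kv.1 && pvCanForm letters kv.1 k))).flatMap Prod.snd := by
  intro l
  induction l with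
  | nil => intro acc; simp
  | cons kv l ih =>
    intro acc
    simp only [List.foldl_cons, List.filter_cons]
    by_cases h : kv.2 ≠ [] ∧ pvCovers pool kv.1 ∧ pvCanForm letters kv.1 k
    · have hb : (!kv.2.isEmpty && (pvCovers pool kv.1 && pvCanForm letters kv.1 k)) = true := by
        simp [h.1, h.2.1, h.2.2]
      rw [if_pos h, hb, ih]
      simp
    · have hb : (!kv.2.isEmpty && (pvCovers pool kv.1 && pvCanForm letters kv.1 k)) = false := by
        rcases not_and_or.mp h with h1 | h2
        · simp [not_not.mp h1]
        · rcases not_and_or.mp h2 with h3 | h4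
          · simp [Bool.not_eq_true _ |>.mp h3]
          · simp [Bool.not_eq_true _ |>.mp h4]
      rw [if_neg h, hb, ih]
      simp

lemma pvFlatMap_filter {α : Type} (g : α → List String) :
    ∀ l : List α, l.flatMap g = (l.filter (fun k => !(g k).isEmpty)).flatMap g := by
  intro l
  induction l with
  | nil => simp
  | cons x l ih =>
    simp only [List.flatMap_cons, List.filter_cons]
    by_cases h : g x = []
    · have : (!(g x).isEmpty) = false := by simp [h]
      rw [this, h]
      simpa using ih
    · have : (!(g x).isEmpty) = true := by simp [h]
      rw [this]
      simp only [if_true, List.flatMap_cons]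
      rw [← ih]


lemma mem_pvCombos : ∀ (xs : List Nat) (k : Nat) (c : List Nat),
    c ∈ pvCombos xs k ↔ c.Sublist xs ∧ c.length = k := by
  intro xs
  induction xs with
  | nil =>
    intro k c
    cases k with
    | zero => simp [pvCombos, List.length_eq_zero_iff]
    | succ k =>
      simp only [pvCombos, List.not_mem_nil, false_iff, not_and]
      intro hs
      have : c = [] := List.sublist_nil.mp hs
      subst this; simp
  | cons x xs ih =>
    intro k c
    cases k with
    | zero =>
      simp only [pvCombos, List.mem_singleton]
      constructor
      · rintro rfl; exact ⟨List.nil_sublist _, rfl⟩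
      · rintro ⟨_, hl⟩; exact List.length_eq_zero_iff.mp hl
    | succ k =>
      simp only [pvCombos, List.mem_append, List.mem_map]
      rw [List.sublist_cons_iff]
      constructor
      · rintro (⟨t, ht, rfl⟩ | h)
        · rcases (ih k t).mp ht with ⟨h1, h2⟩
          exact ⟨Or.inr ⟨t, rfl, h1⟩, by simp [h2]⟩
        · rcases (ih (k + 1) c).mp h with ⟨h1, h2⟩
          exact ⟨Or.inl h1, h2⟩
      · rintro ⟨h1 | ⟨t, rfl, ht⟩, h2⟩
        · exact Or.inr ((ih (k + 1) c).mpr ⟨h1, h2⟩)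
        · exact Or.inl ⟨t, (ih k t).mpr ⟨ht, by simpa using h2⟩, rfl⟩


lemma pvMap_getD_range (l : List String) :
    (List.range l.length).map (fun i => l.getD i "") = l := by
  apply List.ext_getElem
  · simp
  · intro i h1 h2
    simp only [List.getElem_map, List.getElem_range]
    rw [List.getD_eq_getElem]


lemma pvReachable_iff (letters : List String) (k : Nat) (key : String) :
    (∃ c ∈ pvCombos (List.range letters.length) k, pvKeyOf letters c = key) ↔
      (∃ s, s.Sublist letters ∧ s.length = k ∧ pvConcat s = key.toList) := by
  constructor
  · rintro ⟨c, hc, rfl⟩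
    rcases (mem_pvCombos _ _ _).mp hc with ⟨hsub, hlen⟩
    refine ⟨c.map (fun i => letters.getD i ""), ?_, by simpa using hlen, ?_⟩
    · have := hsub.map (fun i => letters.getD i "")
      rwa [pvMap_getD_range letters] at this
    · rw [toList_pvKeyOf]
  · rintro ⟨s, hsub, hlen, hcat⟩
    rw [← pvMap_getD_range letters] at hsub
    rcases List.sublist_map_iff.mp hsub with ⟨c, hc, rfl⟩
    refine ⟨c, (mem_pvCombos _ _ _).mpr ⟨hc, by simpa using hlen⟩, ?_⟩
    apply String.toList_inj.mp
    rw [toList_pvKeyOf, hcat]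


lemma pvSublist_append_singleton {α : Type} (s pre : List α) (a : α) :
    s.Sublist (pre ++ [a]) ↔ s.Sublist pre ∨ ∃ t, t.Sublist pre ∧ s = t ++ [a] := by
  rw [List.sublist_append_iff]
  constructor
  · rintro ⟨l1, l2, rfl, h1, h2⟩
    rcases List.sublist_singleton.mp h2 with rfl | rfl
    · exact Or.inl (by simpa using h1)
    · exact Or.inr ⟨l1, h1, rfl⟩
  · rintro (h | ⟨t, ht, rfl⟩)
    · exact ⟨s, [], by simp, h, by simp⟩
    · exact ⟨t, [a], rfl, ht, by simp⟩

lemma mem_pvDpInner (kl L : List Char) (m : Nat) :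
    ∀ (l : List (Nat × Nat)) (ns : PySem.Set (Nat × Nat)) (x : Nat × Nat),
      x ∈ l.foldl (fun ns pu => if L.isPrefixOf (kl.drop pu.1) then PySem.Set.add ns (pu.1 + m, pu.2 + 1) else ns) ns
        ↔ x ∈ ns ∨ ∃ pu ∈ l, L.isPrefixOf (kl.drop pu.1) ∧ x = (pu.1 + m, pu.2 + 1) := by
  intro l
  induction l with
  | nil => intro ns x; simp
  | cons pu l ih =>
    intro ns x
    simp only [List.foldl_cons]
    by_cases h : L.isPrefixOf (kl.drop pu.1)
    · rw [if_pos h, ih]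
      simp only [PySem.Set.mem_add, List.mem_cons]
      constructor
      · rintro ((h1 | rfl) | ⟨q, hq, h2, rfl⟩)
        · exact Or.inl h1
        · exact Or.inr ⟨pu, Or.inl rfl, h, rfl⟩
        · exact Or.inr ⟨q, Or.inr hq, h2, rfl⟩
      · rintro (h1 | ⟨q, (rfl | hq), h2, rfl⟩)
        · exact Or.inl (Or.inl h1)
        · exact Or.inl (Or.inr rfl)
        · exact Or.inr ⟨q, hq, h2, rfl⟩
    · rw [if_neg h, ih]
      constructor
      · rintro (h1 | ⟨q, hq, h2, rfl⟩)
        · exact Or.inl h1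
        · exact Or.inr ⟨q, List.mem_cons_of_mem _ hq, h2, rfl⟩
      · rintro (h1 | ⟨q, hq, h2, rfl⟩)
        · exact Or.inl h1
        · rcases List.mem_cons.mp hq with rfl | hq
          · exact absurd h2 h
          · exact Or.inr ⟨q, hq, h2, rfl⟩


lemma pvReach_append (pre : List String) (L : String) (kl : List Char) (x : Nat × Nat) :
    pvReach (pre ++ [L]) kl x ↔
      pvReach pre kl x ∨
        ∃ p c : Nat, pvReach pre kl (p, c) ∧ L.toList.isPrefixOf (kl.drop p) ∧ x = (p + L.toList.length, c + 1) := by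
  constructor
  · rintro ⟨s, hsub, hlen, hcat, hle⟩
    rcases (pvSublist_append_singleton s pre L).mp hsub with h | ⟨t, ht, rfl⟩
    · exact Or.inl ⟨s, h, hlen, hcat, hle⟩
    · right
      have hcat' : pvConcat t ++ L.toList = kl.take x.1 := by
        simpa [pvConcat] using hcat
      have hlen1 : (kl.take x.1).length = x.1 := by simp [hle]
      have hx1 : x.1 = (pvConcat t).length + L.toList.length := by
        rw [← hlen1, ← hcat']; simp
      set p := (pvConcat t).length with hp
      have hple : p ≤ x.1 := by omega
      have htake : pvConcat t = kl.take p := by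
        have : (pvConcat t ++ L.toList).take p = pvConcat t := by
          rw [List.take_append_of_le_length hp.ge]
          simp
        rw [hcat'] at this
        rw [← this, List.take_take, min_eq_left hple]
      have hLpre : L.toList.isPrefixOf (kl.drop p) := by
        apply List.isPrefixOf_iff_prefix.mpr
        have : L.toList = (kl.take x.1).drop p := by
          rw [← hcat', List.drop_append_of_le_length hp.ge]
          simp
        rw [this, List.drop_take]
        exact List.take_prefix _ _
      refine ⟨p, t.length, ⟨t, ht, rfl, htake, by omega⟩, hLpre, ?_⟩
      have : x.2 = t.length + 1 := by simpa using hlen.symm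
      have hx : x = (x.1, x.2) := rfl
      rw [hx, this, hx1]
  · rintro (⟨s, hsub, hlen, hcat, hle⟩ | ⟨p, c, ⟨s, hsub, hlen, hcat, hle⟩, hLpre, rfl⟩)
    · exact ⟨s, hsub.trans (List.sublist_append_left _ _), hlen, hcat, hle⟩
    · have hpre := List.isPrefixOf_iff_prefix.mp hLpre
      have hm : L.toList.length ≤ kl.length - p := by
        have := hpre.length_le
        simpa using this
      refine ⟨s ++ [L], hsub.append (List.Sublist.refl _), by simpa using hlen, ?_, by omega⟩
      have hLeq : L.toList = (kl.drop p).take L.toList.length := List.prefix_iff_eq_take.mp hpre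
      have hcc : pvConcat (s ++ [L]) = pvConcat s ++ L.toList := by simp [pvConcat]
      rw [hcc, hcat, List.take_add, ← hLeq]


lemma mem_pvDpFold (key : String) : ∀ (letters : List String) (x : Nat × Nat),
    x ∈ letters.foldl
      (fun (states : PySem.Set (Nat × Nat)) letter =>
        states.foldl
          (fun ns pu =>
            if letter.toList.isPrefixOf (key.toList.drop pu.1)
            then PySem.Set.add ns (pu.1 + letter.toList.length, pu.2 + 1)
            else ns)
          states)
      (PySem.Set.ofList [((0 : Nat), (0 : Nat))]) ↔ pvReach letters key.toList x := by
  intro letters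
  induction letters using List.reverseRecOn with
  | nil =>
    intro x
    simp only [List.foldl_nil, PySem.Set.mem_ofList, List.mem_singleton]
    constructor
    · rintro rfl
      exact ⟨[], List.nil_sublist _, rfl, by simp [pvConcat], by simp⟩
    · rintro ⟨s, hsub, hlen, hcat, hle⟩
      have hs : s = [] := List.sublist_nil.mp hsub
      subst hs
      have h1 := congrArg List.length hcat
      simp only [pvConcat, List.map_nil, List.flatten_nil, List.length_nil, List.length_take] at h1
      have hx1 : x.1 = 0 := by omega
      have hx2 : x.2 = 0 := by simpa using hlen.symm
      exact Prod.ext hx1 hx2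
  | append_singleton pre L ih =>
    intro x
    rw [List.foldl_append, List.foldl_cons, List.foldl_nil,
      mem_pvDpInner key.toList L.toList L.toList.length, pvReach_append]
    constructor
    · rintro (h | ⟨pu, hpu, hcond, rfl⟩)
      · exact Or.inl ((ih x).mp h)
      · exact Or.inr ⟨pu.1, pu.2, (ih pu).mp hpu, hcond, rfl⟩
    · rintro (h | ⟨p, c, hpc, hcond, rfl⟩)
      · exact Or.inl ((ih x).mpr h)
      · exact Or.inr ⟨(p, c), (ih (p, c)).mpr hpc, hcond, rfl⟩

lemma pvCanForm_iff (letters : List String) (key : String) (count : Nat) :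
    pvCanForm letters key count = true ↔
      ∃ s, s.Sublist letters ∧ s.length = count ∧ pvConcat s = key.toList := by
  unfold pvCanForm
  rw [PySem.Set.contains_iff, mem_pvDpFold]
  unfold pvReach
  constructor
  · rintro ⟨s, hsub, hlen, hcat, -⟩
    rw [List.take_length] at hcat
    exact ⟨s, hsub, hlen, hcat⟩
  · rintro ⟨s, hsub, hlen, hcat⟩
    exact ⟨s, hsub, hlen, by rw [List.take_length]; exact hcat, le_refl _⟩


lemma pvConcat_sublist {s letters : List String} (h : s.Sublist letters) :
    (pvConcat s).Sublist (pvConcat letters) := by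
  unfold pvConcat
  rw [← List.flatMap_def, ← List.flatMap_def]
  exact h.flatMap String.toList

lemma pvCovers_of_canForm (letters : List String) (key : String) (k : Nat)
    (h : pvCanForm letters key k = true) :
    pvCovers ((PySem.Str.join "" letters).toList.foldl (fun d ch => d.modify ch 0 (· + 1)) PySem.Dict.empty) key = true := by
  rcases (pvCanForm_iff letters key k).mp h with ⟨s, hs, -, hcat⟩
  have hpl : (PySem.Str.join "" letters).toList = pvConcat letters := by
    rw [PySem.Str.toList_join]
    simpa [pvConcat] using pvJoinEmpty (letters.map String.toList)
  unfold pvCovers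
  rw [hpl]
  rw [show (key.toList.foldl (fun d ch => d.modify ch 0 (· + 1)) PySem.Dict.empty)
      = PySem.Dict.counter key.toList from rfl,
    show ((pvConcat letters).foldl (fun d ch => d.modify ch 0 (· + 1)) PySem.Dict.empty)
      = PySem.Dict.counter (pvConcat letters) from rfl]
  rw [PySem.Dict.items_counter, List.all_eq_true]
  intro kv hkv
  rcases List.mem_map.mp hkv with ⟨c, hc, rfl⟩
  simp only [PySem.Dict.getD_counter, decide_eq_true_eq]
  rw [← hcat]
  exact_mod_cast (pvConcat_sublist hs).count_le c

lemma pvFlatMap_snd_eq (buckets : List (String × List String)) :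
    ∀ l : List (String × List String), (∀ kv ∈ l, pvG buckets kv.1 = kv.2) →
      l.flatMap Prod.snd = (l.map Prod.fst).flatMap (pvG buckets) := by
  intro l
  induction l with
  | nil => intro _; rfl
  | cons kv l ih =>
    intro h
    simp only [List.flatMap_cons, List.map_cons]
    rw [h kv List.mem_cons_self, ih (fun kv' h' => h kv' (List.mem_cons_of_mem _ h'))]

lemma pvG_eq_of_mem (buckets : List (String × List String)) (hk : (buckets.map Prod.fst).Nodup)
    (kv : String × List String) (hkv : kv ∈ buckets) : pvG buckets kv.1 = kv.2 := by
  have hget : (PySem.Dict.mk buckets).get? kv.1 = some kv.2 := by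
    apply PySem.Dict.get?_of_mem_items
    · exact hkv
    · simpa using hk
  simp [pvG, hget]

lemma pvMatches_perm (letters : List String) (k : Nat) (pool : PySem.Dict Char Int)
    (hpool : pool = (PySem.Str.join "" letters).toList.foldl (fun d ch => d.modify ch 0 (· + 1)) PySem.Dict.empty)
    (buckets : List (String × List String))
    (hk : (buckets.map Prod.fst).Nodup) :
    (((pvCombos (List.range letters.length) k).foldl
        (fun st combo => pvAStep buckets st (pvKeyOf letters combo)) (PySem.Set.empty, [])).2).Perm
      (buckets.foldl (fun acc kv => if kv.2 ≠ [] ∧ pvCovers pool kv.1 ∧ pvCanForm letters kv.1 k then acc ++ kv.2 else acc) []) := by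
  subst hpool
  rw [← List.foldl_map (f := pvKeyOf letters) (g := pvAStep buckets), pvAFold_eq, List.nil_append,
    pvFlatMap_filter (pvG buckets), pvBFold_eq, List.nil_append]
  rw [pvFlatMap_snd_eq buckets _ (fun kv h => pvG_eq_of_mem buckets hk kv (List.mem_of_mem_filter h))]
  apply List.Perm.flatMap_right
  apply (List.perm_ext_iff_of_nodup ?_ ?_).mpr
  · intro x
    simp only [List.mem_filter, List.mem_map, mem_pvNewKeys]
    constructor
    · rintro ⟨⟨hxK, -⟩, hq⟩
      have hgx : pvG buckets x ≠ [] := by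
        simpa [List.isEmpty_iff] using hq
      obtain ⟨ws, hws, hwsne⟩ : ∃ ws, (PySem.Dict.mk buckets).get? x = some ws ∧ ws ≠ [] := by
        cases hg : (PySem.Dict.mk buckets).get? x with
        | none => exact absurd (by simp [pvG, hg]) hgx
        | some ws => exact ⟨ws, rfl, by simpa [pvG, hg] using hgx⟩
      have hcf : pvCanForm letters x k = true := by
        rcases hxK with ⟨c, hc, rfl⟩
        exact (pvCanForm_iff letters _ k).mpr ((pvReachable_iff letters k _).mp ⟨c, hc, rfl⟩)
      refine ⟨(x, ws), ⟨PySem.Dict.mem_items_of_get?_eq_some _ hws, ?_⟩, rfl⟩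
      rw [Bool.and_eq_true, Bool.and_eq_true]
      exact ⟨by simp [hwsne], pvCovers_of_canForm letters x k hcf, hcf⟩
    · rintro ⟨kv, ⟨hkvmem, hp⟩, rfl⟩
      have hne : kv.2 ≠ [] := by
        rcases Bool.and_eq_true_iff.mp hp with ⟨h1, -⟩
        simpa [List.isEmpty_iff] using h1
      have hcf : pvCanForm letters kv.1 k = true :=
        (Bool.and_eq_true_iff.mp (Bool.and_eq_true_iff.mp hp).2).2
      have hgkv := pvG_eq_of_mem buckets hk kv hkvmem
      refine ⟨⟨?_, by simp [PySem.Set.empty]⟩, by simp [hgkv, hne]⟩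
      exact (pvReachable_iff letters k kv.1).mpr ((pvCanForm_iff letters kv.1 k).mp hcf)
  · exact List.Nodup.filter _ (nodup_pvNewKeys _ _)
  · exact List.Nodup.sublist (List.Sublist.map Prod.fst List.filter_sublist) hk


lemma pvPairwise_lt_of_le {α : Type} (kf : α → Int) :
    ∀ l : List α, l.Pairwise (fun a b => kf a ≤ kf b) → l.Nodup →
      (∀ a ∈ l, ∀ b ∈ l, a ≠ b → kf a ≠ kf b) → l.Pairwise (fun a b => kf a < kf b) := by
  intro l
  induction l with
  | nil => intro _ _ _; exact List.Pairwise.nil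
  | cons x l ih =>
    intro hle hnd hinj
    rcases List.pairwise_cons.mp hle with ⟨hx, hle'⟩
    rcases List.nodup_cons.mp hnd with ⟨hxl, hnd'⟩
    refine List.pairwise_cons.mpr ⟨fun b hb => ?_, ?_⟩
    · refine lt_of_le_of_ne (hx b hb) ?_
      exact hinj x (List.mem_cons_self) b (List.mem_cons_of_mem _ hb)
        (fun h => hxl (h ▸ hb))
    · exact ih hle' hnd' (fun a ha b hb => hinj a (List.mem_cons_of_mem _ ha) b (List.mem_cons_of_mem _ hb))


lemma pvFormable_iff (selection : List String) (key : String) (L : Int) :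
    pvFormable selection key L = true ↔
      1 ≤ L ∧ ∃ s, s.Sublist (PySem.List.sorted selection (fun x => x.toList)) ∧
        s.length = L.toNat ∧ pvConcat s = key.toList := by
  simp [pvFormable, List.any_eq_true, List.mem_sublists]

lemma pvKf_inj (word_order : List (String × Int)) (h1 : (word_order.map Prod.fst).Nodup)
    (W : List String)
    (hranks : ∀ p ∈ word_order, ∀ q ∈ word_order, p.1 ∈ W → q.1 ∈ W → p.1 ≠ q.1 → p.2 ≠ q.2)
    (a b : String) (ha : a ∈ W) (hb : b ∈ W)
    (hka : a ∈ word_order.map Prod.fst) (hkb : b ∈ word_order.map Prod.fst) (hne : a ≠ b) :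
    (PySem.Dict.mk word_order).getD a 0 ≠ (PySem.Dict.mk word_order).getD b 0 := by
  intro heq
  obtain ⟨pa, hpa, ha1⟩ := List.mem_map.mp hka
  obtain ⟨pb, hpb, hb1⟩ := List.mem_map.mp hkb
  have hga : (PySem.Dict.mk word_order).get? a = some pa.2 := by
    apply PySem.Dict.get?_of_mem_items
    · show (a, pa.2) ∈ word_order
      rw [← ha1]
      simpa using hpa
    · simpa using h1
  have hgb : (PySem.Dict.mk word_order).get? b = some pb.2 := by
    apply PySem.Dict.get?_of_mem_items
    · show (b, pb.2) ∈ word_order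
      rw [← hb1]
      simpa using hpb
    · simpa using h1
  rw [PySem.Dict.getD_eq_get?_getD, PySem.Dict.getD_eq_get?_getD, hga, hgb] at heq
  simp only [Option.getD_some] at heq
  exact hranks pa hpa pb hpb (ha1 ▸ ha) (hb1 ▸ hb) (fun h => hne (ha1 ▸ hb1 ▸ h)) heq

lemma pvSorted_eq (word_order : List (String × Int)) (h1 : (word_order.map Prod.fst).Nodup)
    (W : List String)
    (hranks : ∀ p ∈ word_order, ∀ q ∈ word_order, p.1 ∈ W → q.1 ∈ W → p.1 ≠ q.1 → p.2 ≠ q.2)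
    (mA mB : List String) (hperm : mA.Perm mB) (hnd : mB.Nodup)
    (hW : ∀ w ∈ mB, w ∈ W) (hmem : ∀ w ∈ mB, w ∈ word_order.map Prod.fst) :
    PySem.List.sorted mA (fun w => (PySem.Dict.mk word_order).getD w 0)
      = PySem.List.sorted mB (fun w => (PySem.Dict.mk word_order).getD w 0) := by
  apply PySem.List.sorted_eq_of_perm_of_pairwise_lt
  · exact (PySem.List.sorted_perm mB _ false).trans hperm.symm
  · apply pvPairwise_lt_of_le
    · exact PySem.List.sorted_pairwise mB _
    · exact ((PySem.List.sorted_perm mB _ false).nodup_iff).mpr hnd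
    · intro a ha b hb hne
      have ha' := (PySem.List.mem_sorted _ _ _ _).mp ha
      have hb' := (PySem.List.mem_sorted _ _ _ _).mp hb
      exact pvKf_inj word_order h1 W hranks a b (hW a ha') (hW b hb')
        (hmem a ha') (hmem b hb') hne

lemma pvFilter_sublist_filter {α : Type} (p q : α → Bool) (hpq : ∀ x, p x = true → q x = true) :
    ∀ l : List α, (l.filter p).Sublist (l.filter q) := by
  intro l
  induction l with
  | nil => simp
  | cons x l ih =>
    simp only [List.filter_cons]
    by_cases hx : p x = true
    · rw [hx, hpq x hx]
      exact ih.cons₂ x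
    · rw [Bool.not_eq_true] at hx
      rw [hx]
      cases hq : q x
      · exact ih
      · exact ih.cons x

lemma pvFindSome?_congr {α β : Type} (f g : α → Option β) :
    ∀ l : List α, (∀ a ∈ l, f a = g a) → l.findSome? f = l.findSome? g := by
  intro l
  induction l with
  | nil => intro _; rfl
  | cons a l ih =>
    intro h
    rw [List.findSome?_cons, List.findSome?_cons, h a List.mem_cons_self,
      ih (fun b hb => h b (List.mem_cons_of_mem _ hb))]

lemma pvTry_eq (selection : List String) (anagram_index : List (Int × List (String × List String)))
    (word_order : List (String × Int))
    (hpre : Pre_find_best_words selection anagram_index word_order) (tl : Int) (htl : 1 ≤ tl) :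
    pvATry (PySem.List.sorted selection (fun s => s.toList)) anagram_index word_order tl
      = pvBTry (PySem.List.sorted selection (fun s => s.toList))
          ((PySem.Str.join "" (PySem.List.sorted selection (fun s => s.toList))).toList.foldl
            (fun d ch => d.modify ch 0 (· + 1)) PySem.Dict.empty) anagram_index word_order tl := by
  set letters := PySem.List.sorted selection (fun s => s.toList) with hlet
  set pool : PySem.Dict Char Int := (PySem.Str.join "" letters).toList.foldl (fun d ch => d.modify ch 0 (· + 1)) PySem.Dict.empty with hpool
  unfold pvATry pvBTry
  cases hb : (PySem.Dict.mk anagram_index).get? tl with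
  | none => rfl
  | some buckets =>
    dsimp only
    have hbmem : (tl, buckets) ∈ anagram_index := PySem.Dict.mem_items_of_get?_eq_some _ hb
    obtain ⟨hpre1, hpre2, hpre4⟩ := hpre
    obtain ⟨hknd, hwnd, hwmem, hranks⟩ := hpre4 (tl, buckets) hbmem
    by_cases hbe : buckets = []
    · simp [hbe]
    · rw [if_neg hbe, if_neg hbe]
      have hperm := pvMatches_perm letters tl.toNat pool hpool buckets hknd
      set mA := ((pvCombos (List.range letters.length) tl.toNat).foldl
        (fun st combo => pvAStep buckets st (pvKeyOf letters combo)) (PySem.Set.empty, [])).2 with hmA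
      set mB := buckets.foldl
        (fun acc kv => if kv.2 ≠ [] ∧ pvCovers pool kv.1 ∧ pvCanForm letters kv.1 tl.toNat then acc ++ kv.2 else acc) [] with hmB
      have hBsub : mB.Sublist (pvMatchWords selection (tl, buckets)) := by
        rw [hmB, pvBFold_eq, List.nil_append]
        unfold pvMatchWords
        apply List.Sublist.flatMap _ Prod.snd
        apply pvFilter_sublist_filter
        intro kv hkv
        rcases Bool.and_eq_true_iff.mp hkv with ⟨-, h23⟩
        rcases Bool.and_eq_true_iff.mp h23 with ⟨-, hcf⟩
        rcases (pvCanForm_iff letters kv.1 tl.toNat).mp hcf with ⟨s, hs1, hs2, hs3⟩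
        exact (pvFormable_iff selection kv.1 tl).mpr ⟨htl, s, hs1, hs2, hs3⟩
      have hiff : mA = [] ↔ mB = [] := by
        rw [← List.length_eq_zero_iff, ← List.length_eq_zero_iff, hperm.length_eq]
      by_cases hA : mA = []
      · rw [if_pos hA, if_pos (hiff.mp hA)]
      · rw [if_neg hA, if_neg (fun h => hA (hiff.mpr h))]
        have hs := pvSorted_eq word_order hpre2 (pvMatchWords selection (tl, buckets)) hranks mA mB hperm
          (List.Nodup.sublist hBsub hwnd)
          (fun w hw => hBsub.subset hw)
          (fun w hw => hwmem w (hBsub.subset hw))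
        rw [hs]

-- ===== VERDICT (by name: the statement is the Claim_ definition above) =====
theorem find_best_words_spec : Claim_equal_find_best_words := by
  intro selection anagram_index word_order _hdom hpre
  unfold Spec_find_best_words find_best_words find_best_words_alt
  by_cases hai : anagram_index = []
  · rw [if_pos hai, if_pos hai]
  · rw [if_neg hai, if_neg hai]
    dsimp only
    apply congrArg (fun o => Option.getD o (([], 0) : List String × Int))
    apply pvFindSome?_congr
    intro tl htl
    have h1 := (PySem.List.mem_pyRange_neg_one).mp htl
    exact pvTry_eq selection anagram_index word_order hpre tl (by omega)
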